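-- pv_equiv track=rewrite | github.com/tecunningham/tecunningham.github.io | tools/forecasts_test.py | iter_tables
-- ===== SOURCE A (Python) =====
-- def iter_tables(text: str) -> list[list[str]]:
--     lines = text.splitlines()
--     tables: list[list[str]] = []
--     i = 0
--     while i < len(lines):
--         line = lines[i]
--         if line.strip().startswith("|"):
--             table_lines: list[str] = []
--             while i < len(lines) and lines[i].strip().startswith("|"):
--                 table_lines.append(lines[i])
--                 i += 1
--             tables.append(table_lines)
--             continue
--         i += 1
--     return tables
-- ===== SOURCE B (Python) =====
-- def iter_tables(text: str) -> list[list[str]]: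
--     tables: list[list[str]] = []
--     run: list[str] = []
--     for line in text.splitlines():
--         if line.strip().startswith("|"):
--             run.append(line)
--         elif run:
--             tables.append(run)
--             run = []
--     if run:
--         tables.append(run)
--     return tables
-- ===== Notes on version B (the rewrite author's own statement) =====
-- stated objective: simpler
-- what changed: Replaced the index-driven outer/inner while loops with a single for pass keeping a current-run accumulator that is flushed when a non-pipe line (or the end) is reached.
import Mathlib
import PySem

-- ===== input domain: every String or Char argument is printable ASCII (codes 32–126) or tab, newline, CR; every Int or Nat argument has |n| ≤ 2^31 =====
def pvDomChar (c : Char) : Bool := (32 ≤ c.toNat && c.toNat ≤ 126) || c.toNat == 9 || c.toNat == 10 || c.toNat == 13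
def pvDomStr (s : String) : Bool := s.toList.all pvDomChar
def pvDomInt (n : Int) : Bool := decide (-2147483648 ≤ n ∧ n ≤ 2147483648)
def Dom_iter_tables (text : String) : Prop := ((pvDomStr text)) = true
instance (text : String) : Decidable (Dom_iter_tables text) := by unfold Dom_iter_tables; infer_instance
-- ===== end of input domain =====

-- B replaces A's index-driven nested while loops by a single pass with a current-run
-- accumulator flushed at each non-pipe line (objective: simpler).

-- ===== PORT A =====
-- inner while loop of A: collects lines[i], lines[i+1], … while they keep the pipe prefix,
-- returns (table_lines, final i)
def pvAInner (lines : List String) (i : Nat) : List String × Nat :=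
  if _h : i < lines.length ∧ PySem.Str.startswith (PySem.Str.strip (lines.getD i "")) "|" = true then
    let r := pvAInner lines (i + 1)
    ((lines.getD i "") :: r.1, r.2)
  else
    ([], i)
termination_by lines.length - i
decreasing_by omega

-- the inner loop never moves i backwards (used only for termination of the outer loop)
theorem pvAInner_snd_ge (lines : List String) (i : Nat) : i ≤ (pvAInner lines i).2 := by
  fun_induction pvAInner lines i with
  | case1 i h r ih => simp only [r]; omega
  | case2 i h => simp

-- outer while loop of A
def pvAOuter (lines : List String) (i : Nat) (tables : List (List String)) :
    List (List String) :=
  if h : i < lines.length then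
    if PySem.Str.startswith (PySem.Str.strip (lines.getD i "")) "|" = true then
      let r := pvAInner lines i
      pvAOuter lines r.2 (tables ++ [r.1])
    else
      pvAOuter lines (i + 1) tables
  else
    tables
termination_by lines.length - i
decreasing_by
  · have h1 : (pvAInner lines i).2 = (pvAInner lines (i + 1)).2 := by
      rw [pvAInner]; simp_all
    have h2 := pvAInner_snd_ge lines (i + 1)
    omega
  · omega

def iter_tables (text : String) : List (List String) :=
  pvAOuter (PySem.Str.splitlines text) 0 []

-- ===== PORT B =====
def pvBStep (st : List (List String) × List String) (line : String) :
    List (List String) × List String :=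
  if PySem.Str.startswith (PySem.Str.strip line) "|" = true then (st.1, st.2 ++ [line])
  else if st.2 ≠ [] then (st.1 ++ [st.2], [])
  else st

def iter_tables_alt (text : String) : List (List String) :=
  let st := (PySem.Str.splitlines text).foldl pvBStep ([], [])
  if st.2 ≠ [] then st.1 ++ [st.2] else st.1

-- ===== PRECONDITION & SPEC =====
def Spec_iter_tables (text : String) (out : List (List String)) : Prop := out = iter_tables_alt text
instance (text : String) (out : List (List String)) : Decidable (Spec_iter_tables text out) := by unfold Spec_iter_tables; infer_instance

-- ===== CLAIM (what is proved, stated in full; the proofs are below) =====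
def Claim_equal_iter_tables : Prop := ∀ (text : String), Dom_iter_tables text → Spec_iter_tables text (iter_tables text)

-- ===== LEMMAS AND PROOFS =====

def pvPred (l : String) : Bool := PySem.Str.startswith (PySem.Str.strip l) "|"

-- reference function: tables of a line list, structurally
def pvG : List String → List (List String)
  | [] => []
  | l :: ls =>
    if pvPred l then (l :: ls.takeWhile pvPred) :: pvG (ls.dropWhile pvPred)
    else pvG ls
termination_by ls => ls.length
decreasing_by
  · have := ls.length_dropWhile_le pvPred; simp; omega
  · simp

theorem pvAInner_eq (lines : List String) (i : Nat) :
    pvAInner lines i =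
      ((lines.drop i).takeWhile pvPred, i + ((lines.drop i).takeWhile pvPred).length) := by
  fun_induction pvAInner lines i with
  | case1 i h r ih =>
    obtain ⟨hlt, hp⟩ := h
    have hd : lines.drop i = lines[i] :: lines.drop (i + 1) := List.drop_eq_getElem_cons hlt
    have hg : lines.getD i "" = lines[i] := List.getD_eq_getElem lines "" hlt
    rw [hg] at hp
    have hpred : pvPred lines[i] = true := hp
    simp only [r, ih, hd, hg, List.takeWhile_cons_of_pos hpred]
    simp; omega
  | case2 i h =>
    rcases Nat.lt_or_ge i lines.length with hlt | hge
    · have hd : lines.drop i = lines[i] :: lines.drop (i + 1) := List.drop_eq_getElem_cons hlt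
      have hg : lines.getD i "" = lines[i] := List.getD_eq_getElem lines "" hlt
      have hp : ¬ (PySem.Str.startswith (PySem.Str.strip (lines.getD i "")) "|" = true) :=
        fun hc => h ⟨hlt, hc⟩
      rw [hg] at hp
      have hpred : ¬ pvPred lines[i] = true := hp
      rw [hd, List.takeWhile_cons_of_neg (by simpa using hpred)]
      simp
    · rw [List.drop_eq_nil_of_le hge]; simp

theorem pvDropLen (p : String → Bool) (l : List String) :
    l.drop (l.takeWhile p).length = l.dropWhile p := by
  induction l with
  | nil => rfl
  | cons a l ih =>
    by_cases h : p a = true <;>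
      simp [h, ih]

theorem pvAOuter_eq (lines : List String) (i : Nat) (tables : List (List String)) :
    pvAOuter lines i tables = tables ++ pvG (lines.drop i) := by
  fun_induction pvAOuter lines i tables with
  | case1 i tables hlt hp r ih =>
    have hd : lines.drop i = lines[i] :: lines.drop (i + 1) := List.drop_eq_getElem_cons hlt
    have hg : lines.getD i "" = lines[i] := List.getD_eq_getElem lines "" hlt
    rw [hg] at hp
    have hpred : pvPred lines[i] = true := hp
    have hinner := pvAInner_eq lines i
    have hdropw : lines.drop (i + ((lines.drop i).takeWhile pvPred).length) =
        (lines.drop i).dropWhile pvPred := by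
      rw [← List.drop_drop]; exact pvDropLen pvPred (lines.drop i)
    rw [ih]
    simp only [r, hinner]
    rw [hdropw]
    conv_rhs => rw [hd]
    rw [pvG, if_pos hpred]
    rw [show List.takeWhile pvPred (lines.drop i) =
          lines[i] :: List.takeWhile pvPred (lines.drop (i + 1)) by
        rw [hd, List.takeWhile_cons_of_pos hpred],
      show List.dropWhile pvPred (lines.drop i) =
          List.dropWhile pvPred (lines.drop (i + 1)) by
        rw [hd, List.dropWhile_cons_of_pos hpred]]
    simp
  | case2 i tables hlt hp ih =>
    have hd : lines.drop i = lines[i] :: lines.drop (i + 1) := List.drop_eq_getElem_cons hlt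
    have hg : lines.getD i "" = lines[i] := List.getD_eq_getElem lines "" hlt
    rw [hg] at hp
    have hpred : ¬ pvPred lines[i] = true := hp
    rw [ih]
    conv_rhs => rw [hd, pvG, if_neg hpred]
  | case3 i tables hge =>
    rw [List.drop_eq_nil_of_le (by omega)]; simp [pvG]

-- B-side reference: continue the loop with current run `run` over the remaining lines,
-- flushing at the end
def pvH : List String → List String → List (List String)
  | run, [] => if run ≠ [] then [run] else []
  | run, l :: ls =>
    if pvPred l then pvH (run ++ [l]) ls
    else if run ≠ [] then run :: pvH [] ls
    else pvH [] ls

theorem pvH_eq (ls : List String) :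
    (∀ run : List String, run ≠ [] →
        pvH run ls = (run ++ ls.takeWhile pvPred) :: pvG (ls.dropWhile pvPred)) ∧
      pvH [] ls = pvG ls := by
  induction ls with
  | nil =>
    refine ⟨fun run hne => ?_, ?_⟩
    · simp [pvH, hne, pvG]
    · simp [pvH, pvG]
  | cons l ls ih =>
    obtain ⟨ih1, ih2⟩ := ih
    by_cases hp : pvPred l = true
    · refine ⟨fun run hne => ?_, ?_⟩
      · rw [pvH, if_pos hp, ih1 (run ++ [l]) (by simp),
          List.takeWhile_cons_of_pos hp, List.dropWhile_cons_of_pos hp]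
        simp
      · rw [pvH, if_pos hp]
        have h1 := ih1 [l] (by simp)
        rw [show ([] : List String) ++ [l] = [l] from rfl, h1, pvG, if_pos hp]
        simp
    · refine ⟨fun run hne => ?_, ?_⟩
      · rw [pvH, if_neg hp, if_pos hne, ih2,
          List.takeWhile_cons_of_neg (by simpa using hp),
          List.dropWhile_cons_of_neg (by simpa using hp)]
        simp [pvG, hp]
      · rw [pvH, if_neg hp]
        simp only [ne_eq, not_true_eq_false, if_false]
        rw [ih2, pvG, if_neg hp]

theorem pvFoldl_eq (ls : List String) :
    ∀ (tables : List (List String)) (run : List String),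
      (if (ls.foldl pvBStep (tables, run)).2 ≠ [] then
          (ls.foldl pvBStep (tables, run)).1 ++ [(ls.foldl pvBStep (tables, run)).2]
        else (ls.foldl pvBStep (tables, run)).1) = tables ++ pvH run ls := by
  induction ls with
  | nil =>
    intro tables run
    by_cases h : run = []
    · simp [pvH, h]
    · simp [pvH, h]
  | cons l ls ih =>
    intro tables run
    rw [List.foldl_cons]
    by_cases hp : pvPred l = true
    · have hps : PySem.Str.startswith (PySem.Str.strip l) "|" = true := hp
      rw [show pvBStep (tables, run) l = (tables, run ++ [l]) by
        simp only [pvBStep, if_pos hps]]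
      rw [ih tables (run ++ [l]), pvH, if_pos hp]
    · have hps : ¬ (PySem.Str.startswith (PySem.Str.strip l) "|" = true) := hp
      by_cases hr : run = []
      · rw [show pvBStep (tables, run) l = (tables, run) by
          simp only [pvBStep, if_neg hps]; simp [hr]]
        rw [ih tables run, hr, pvH, if_neg hp]
        simp
      · rw [show pvBStep (tables, run) l = (tables ++ [run], []) by
          simp only [pvBStep, if_neg hps]; simp [hr]]
        rw [ih (tables ++ [run]) [], pvH, if_neg hp, if_pos hr]
        simp

-- ===== VERDICT (by name: the statement is the Claim_ definition above) =====
theorem iter_tables_spec : Claim_equal_iter_tables := by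
  intro text _
  unfold Spec_iter_tables iter_tables iter_tables_alt
  rw [pvAOuter_eq]
  simp only [List.drop_zero, List.nil_append]
  have hb := pvFoldl_eq (PySem.Str.splitlines text) [] []
  simp only [] at hb ⊢
  rw [hb, (pvH_eq (PySem.Str.splitlines text)).2]
  simp
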